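-- pv_equiv track=rewrite | github.com/horeilly/advent-of-code-2023 | code/1201_springs.py | build_solution
-- ===== SOURCE A (Python) =====
-- def build_solution(candidate: str, insertion_indexes: list[int]) -> str:
--     solution = ""
--     for i in range(len(candidate)):
--         if i in insertion_indexes:
--             solution += "#"
--         elif candidate[i] == "?":
--             solution += "."
--         else:
--             solution += candidate[i]
--     return solution
-- ===== SOURCE B (Python) =====
-- def build_solution(candidate: str, insertion_indexes: list[int]) -> str:
--     chars = list(candidate.replace("?", "."))
--     n = len(chars)
--     for idx in insertion_indexes:
--         if 0 <= idx < n: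
--             chars[idx] = "#"
--     return "".join(chars)
-- ===== Notes on version B (the rewrite author's own statement) =====
-- stated objective: faster
-- what changed: B substitutes '?' once with str.replace and then iterates the insertion-index list setting chars in place, instead of testing 'i in insertion_indexes' (a linear scan) at every candidate position.
import Mathlib
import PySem

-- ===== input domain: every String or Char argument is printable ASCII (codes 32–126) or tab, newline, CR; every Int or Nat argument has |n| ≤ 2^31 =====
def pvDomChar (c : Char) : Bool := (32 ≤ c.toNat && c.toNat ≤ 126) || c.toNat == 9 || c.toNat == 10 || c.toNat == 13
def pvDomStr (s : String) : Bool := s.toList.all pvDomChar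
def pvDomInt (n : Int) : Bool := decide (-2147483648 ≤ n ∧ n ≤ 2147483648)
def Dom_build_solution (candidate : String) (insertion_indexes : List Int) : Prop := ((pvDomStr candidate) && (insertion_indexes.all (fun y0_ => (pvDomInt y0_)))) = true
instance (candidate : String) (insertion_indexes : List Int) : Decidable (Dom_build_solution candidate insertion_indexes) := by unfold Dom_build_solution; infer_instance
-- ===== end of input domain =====

-- B replaces A's per-position membership scan by one '?'→'.' substitution pass plus a
-- single loop over the insertion indexes writing '#' in place (objective: faster).

-- ===== PORT A =====
-- builds the result character by character over range(len(candidate)), testing membership each step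
def build_solution (candidate : String) (insertion_indexes : List Int) : String :=
  let cs := candidate.toList
  String.mk ((PySem.List.pyRange 0 (cs.length : Int) 1).foldl
    (fun solution i =>
      if i ∈ insertion_indexes then solution ++ ['#']
      else if PySem.List.pyGetD cs i ' ' = '?' then solution ++ ['.']
      else solution ++ [PySem.List.pyGetD cs i ' ']) [])

-- ===== PORT B =====
-- substitute '?' once, then overwrite the in-range insertion positions with '#'
def build_solution_alt (candidate : String) (insertion_indexes : List Int) : String :=
  let chars := candidate.toList.map (fun c => if c = '?' then '.' else c)
  let n : Int := (chars.length : Int)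
  String.mk (insertion_indexes.foldl
    (fun chars idx => if 0 ≤ idx ∧ idx < n then chars.set idx.toNat '#' else chars) chars)

-- ===== PRECONDITION & SPEC =====
def Spec_build_solution (candidate : String) (insertion_indexes : List Int) (out : String) : Prop := out = build_solution_alt candidate insertion_indexes
instance (candidate : String) (insertion_indexes : List Int) (out : String) : Decidable (Spec_build_solution candidate insertion_indexes out) := by unfold Spec_build_solution; infer_instance

-- ===== CLAIM (what is proved, stated in full; the proofs are below) =====
def Claim_equal_build_solution : Prop := ∀ (candidate : String) (insertion_indexes : List Int), Dom_build_solution candidate insertion_indexes → Spec_build_solution candidate insertion_indexes (build_solution candidate insertion_indexes)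

-- ===== LEMMAS AND PROOFS =====

-- B's fold preserves the length of the character list
lemma length_foldl_set (ns : List Int) (N : Int) (l : List Char) :
    (ns.foldl (fun chars idx => if 0 ≤ idx ∧ idx < N then chars.set idx.toNat '#' else chars) l).length
      = l.length := by
  induction ns generalizing l with
  | nil => rfl
  | cons a t ih =>
      simp only [List.foldl_cons]
      split_ifs with h
      · rw [ih, List.length_set]
      · rw [ih]

-- pointwise characterisation of B's fold
lemma foldl_set_getElem? (ns : List Int) :
    ∀ (l : List Char) (N : Int), N = (l.length : Int) → ∀ i : Nat, i < l.length →
      (ns.foldl (fun chars idx => if 0 ≤ idx ∧ idx < N then chars.set idx.toNat '#' else chars) l)[i]?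
        = some (if (i : Int) ∈ ns then '#' else l.getD i ' ') := by
  induction ns with
  | nil =>
      intro l N _ i hi
      simp [List.getD, List.getElem?_eq_getElem hi]
  | cons a t ih =>
      intro l N hN i hi
      simp only [List.foldl_cons]
      by_cases ha : 0 ≤ a ∧ a < N
      · rw [if_pos ha]
        have hlen : (l.set a.toNat '#').length = l.length := List.length_set ..
        rw [ih (l.set a.toNat '#') N (by rw [hlen]; exact hN) i (by omega)]
        congr 1
        by_cases hmem : (i : Int) ∈ t
        · rw [if_pos hmem, if_pos (List.mem_cons_of_mem _ hmem)]
        · rw [if_neg hmem]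
          by_cases hai : a = (i : Int)
          · rw [if_pos (by rw [List.mem_cons]; left; exact hai.symm)]
            have hti : a.toNat = i := by omega
            rw [List.getD_eq_getElem _ ' ' (by omega : i < (l.set a.toNat '#').length)]
            simp [hti]
          · rw [if_neg (by rw [List.mem_cons]; push Not; exact ⟨fun h => hai h.symm, hmem⟩)]
            have h1 : a.toNat ≠ i := by omega
            rw [List.getD_eq_getElem _ ' ' (by omega : i < (l.set a.toNat '#').length),
              List.getD_eq_getElem _ ' ' hi]
            simp [h1]
      · rw [if_neg ha]
        rw [ih l N hN i hi]
        have hia : ¬ ((i : Int) = a) := by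
          intro h; apply ha; constructor <;> omega
        congr 1
        by_cases hmem : (i : Int) ∈ t <;> simp [List.mem_cons, hmem, hia]

-- A's fold appends one character per index: it is a map over the range
lemma foldlA_eq_map (cs : List Char) (ns : List Int) :
    ((PySem.List.pyRange 0 (cs.length : Int) 1).foldl
      (fun solution i =>
        if i ∈ ns then solution ++ ['#']
        else if PySem.List.pyGetD cs i ' ' = '?' then solution ++ ['.']
        else solution ++ [PySem.List.pyGetD cs i ' ']) [])
    = (PySem.List.pyRange 0 (cs.length : Int) 1).map
        (fun i => if i ∈ ns then '#'
                  else if PySem.List.pyGetD cs i ' ' = '?' then '.'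
                  else PySem.List.pyGetD cs i ' ') := by
  have h : (fun (solution : List Char) (i : Int) =>
        if i ∈ ns then solution ++ ['#']
        else if PySem.List.pyGetD cs i ' ' = '?' then solution ++ ['.']
        else solution ++ [PySem.List.pyGetD cs i ' '])
      = (fun solution i => solution ++
          [if i ∈ ns then '#'
           else if PySem.List.pyGetD cs i ' ' = '?' then '.'
           else PySem.List.pyGetD cs i ' ']) := by
    funext s i; split_ifs <;> rfl
  rw [h, PySem.List.foldl_append_singleton_eq_map, List.nil_append]

-- ===== VERDICT (by name: the statement is the Claim_ definition above) =====
theorem build_solution_spec : Claim_equal_build_solution := by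
  intro candidate insertion_indexes _
  unfold Spec_build_solution build_solution build_solution_alt
  set cs := candidate.toList with hcs
  set base := cs.map (fun c => if c = '?' then '.' else c) with hbase
  have hblen : base.length = cs.length := by simp [hbase]
  simp only []
  congr 1
  rw [foldlA_eq_map]
  apply List.ext_getElem?
  intro i
  by_cases hi : i < cs.length
  · rw [PySem.List.getElem?_map_pyRange_zero _ _ _ hi]
    rw [foldl_set_getElem? _ base _ (by rw [hblen]) i (by omega)]
    congr 1
    by_cases hmem : (i : Int) ∈ insertion_indexes
    · simp [hmem]
    · have hget : PySem.List.pyGetD cs (i : Int) ' ' = cs[i] := by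
        rw [PySem.List.pyGetD_natCast]
        simp [List.getD, List.getElem?_eq_getElem hi]
      have hbget : base.getD i ' ' = (if cs[i] = '?' then '.' else cs[i]) := by
        simp [hbase, List.getD, List.getElem?_eq_getElem (by simpa [hbase] using hi : i < (cs.map fun c => if c = '?' then '.' else c).length)]
      rw [hbget]
      simp [hmem, hget]
  · have h1 : ((PySem.List.pyRange 0 (cs.length : Int) 1).map
        (fun i => if i ∈ insertion_indexes then '#'
                  else if PySem.List.pyGetD cs i ' ' = '?' then '.'
                  else PySem.List.pyGetD cs i ' ')).length = cs.length := by
      simp [PySem.List.length_pyRange_one]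
    rw [List.getElem?_eq_none (by omega), List.getElem?_eq_none (by rw [length_foldl_set]; omega)]
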